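-- pv_equiv track=rewrite | github.com/abolishuniqueusernames/poetry_autoencoding | scripts/scraper.py | is_website_metadata
-- ===== SOURCE A (Python) =====
-- def is_website_metadata(text):
--     """Detect website metadata"""
--     metadata_indicators = [
--         'follow', 'founded', 'website', 'homepage', 'navigation',
--         'subscribe', 'newsletter', 'rate this poem', 'copyright',
--         'allpoetry.com', 'poemhunter.com', 'poetry.com',
--         'window.datalayer', 'google analytics', 'advertisement'
--     ]
--
--     text_lower = text.lower()
--     return any(indicator in text_lower for indicator in metadata_indicators)
-- ===== SOURCE B (Python) =====
-- def is_website_metadata(text):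
--     """Detect website metadata (single left-to-right scan over positions)"""
--     metadata_indicators = [
--         'follow', 'founded', 'website', 'homepage', 'navigation',
--         'subscribe', 'newsletter', 'rate this poem', 'copyright',
--         'allpoetry.com', 'poemhunter.com', 'poetry.com',
--         'window.datalayer', 'google analytics', 'advertisement'
--     ]
--     text_lower = text.lower()
--     for i in range(len(text_lower) + 1):
--         for indicator in metadata_indicators:
--             if text_lower.startswith(indicator, i):
--                 return True
--     return False
-- ===== Notes on version B (the rewrite author's own statement) =====
-- stated objective: alternative
-- what changed: Replaces the 14 independent per-indicator substring membership scans with a single left-to-right pass over the positions of the lowered text, testing at each position whether any indicator starts there.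
import Mathlib
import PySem

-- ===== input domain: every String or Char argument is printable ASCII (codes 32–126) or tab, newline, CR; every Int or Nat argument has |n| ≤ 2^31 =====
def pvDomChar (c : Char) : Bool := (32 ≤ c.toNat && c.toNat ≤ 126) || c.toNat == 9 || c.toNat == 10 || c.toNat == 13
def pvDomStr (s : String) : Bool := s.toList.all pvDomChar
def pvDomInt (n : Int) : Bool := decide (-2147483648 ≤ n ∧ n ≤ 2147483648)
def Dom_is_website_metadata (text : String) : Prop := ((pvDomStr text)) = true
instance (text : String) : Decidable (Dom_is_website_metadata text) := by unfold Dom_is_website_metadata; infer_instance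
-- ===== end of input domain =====

-- B replaces A's 14 independent substring scans by one left-to-right scan over positions; alternative structure, same result.

def pvIndicators : List String :=
  ["follow", "founded", "website", "homepage", "navigation",
   "subscribe", "newsletter", "rate this poem", "copyright",
   "allpoetry.com", "poemhunter.com", "poetry.com",
   "window.datalayer", "google analytics", "advertisement"]

-- ===== PORT A =====
-- any(indicator in text_lower for indicator in metadata_indicators)
def is_website_metadata (text : String) : Bool :=
  pvIndicators.any (fun indicator => PySem.Str.isIn indicator (PySem.Str.lower text))

-- ===== PORT B =====
-- for i in range(len(t)+1): for ind in indicators: if t.startswith(ind, i): return True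
-- scan over the suffixes of the lowered text, checking each indicator as a prefix at the current position
def pvScan (inds : List (List Char)) : List Char → Bool
  | [] => inds.any (fun p => PySem.Chars.startswith [] p)
  | c :: t =>
      inds.any (fun p => PySem.Chars.startswith (c :: t) p) || pvScan inds t

def is_website_metadata_alt (text : String) : Bool :=
  pvScan (pvIndicators.map String.toList) (PySem.Chars.lower text.toList)

-- ===== PRECONDITION & SPEC =====
def Spec_is_website_metadata (text : String) (out : Bool) : Prop := out = is_website_metadata_alt text
instance (text : String) (out : Bool) : Decidable (Spec_is_website_metadata text out) := by unfold Spec_is_website_metadata; infer_instance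

-- ===== CLAIM (what is proved, stated in full; the proofs are below) =====
def Claim_equal_is_website_metadata : Prop := ∀ (text : String), Dom_is_website_metadata text → Spec_is_website_metadata text (is_website_metadata text)

-- ===== LEMMAS AND PROOFS =====

-- the position scan finds exactly the indicators that are infixes of the text
theorem pvScan_iff (inds : List (List Char)) (s : List Char) :
    pvScan inds s = true ↔ ∃ p ∈ inds, p <:+: s := by
  induction s with
  | nil => simp [pvScan, List.any_eq_true, PySem.Chars.startswith_iff]
  | cons c t ih =>
      simp only [pvScan, Bool.or_eq_true, List.any_eq_true,
        PySem.Chars.startswith_iff, ih, List.infix_cons_iff]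
      constructor
      · rintro (⟨p, hp, h⟩ | ⟨p, hp, h⟩)
        · exact ⟨p, hp, Or.inl h⟩
        · exact ⟨p, hp, Or.inr h⟩
      · rintro ⟨p, hp, h | h⟩
        · exact Or.inl ⟨p, hp, h⟩
        · exact Or.inr ⟨p, hp, h⟩

-- ===== VERDICT (by name: the statement is the Claim_ definition above) =====
theorem is_website_metadata_spec : Claim_equal_is_website_metadata := by
  intro text _
  unfold Spec_is_website_metadata is_website_metadata is_website_metadata_alt
  rw [Bool.eq_iff_iff, pvScan_iff]
  simp [List.any_eq_true, PySem.Chars.isIn_iff_infix, PySem.Str.isIn, PySem.Str.lower]
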